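-- pv_equiv track=rewrite | github.com/rafaelpadilla/insomnia | leetcode/utils.py | _create_levels
-- ===== SOURCE A (Python) =====
-- def _create_levels(arr):
--     levels = []
--     for i, el in enumerate(arr):
--         for _ in range(2**i):  # 2 ** i => math.pow(2, i)
--             if len(levels) >= len(arr):
--                 break
--             levels.append(i)
--     return levels
-- ===== SOURCE B (Python) =====
-- def _create_levels(arr):
--     return [(p + 1).bit_length() - 1 for p in range(len(arr))]
-- ===== Notes on version B (the rewrite author's own statement) =====
-- stated objective: faster
-- what changed: Replaced the heap-filling simulation (for each index i, an inner loop over range(2**i) appending level i until a length cap) by a single flat comprehension computing each position's level directly as (p+1).bit_length()-1.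
import Mathlib
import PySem

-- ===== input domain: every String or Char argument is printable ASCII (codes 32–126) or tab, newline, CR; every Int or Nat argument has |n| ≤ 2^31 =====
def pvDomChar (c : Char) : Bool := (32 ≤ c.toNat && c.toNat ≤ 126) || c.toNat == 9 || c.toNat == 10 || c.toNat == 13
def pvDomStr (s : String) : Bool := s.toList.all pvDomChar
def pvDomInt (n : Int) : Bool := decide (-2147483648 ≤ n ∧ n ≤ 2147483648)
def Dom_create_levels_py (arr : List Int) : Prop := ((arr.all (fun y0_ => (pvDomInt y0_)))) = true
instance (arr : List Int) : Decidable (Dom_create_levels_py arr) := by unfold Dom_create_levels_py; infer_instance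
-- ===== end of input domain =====

-- B replaces A's heap-filling simulation (append level i up to 2^i times, capped at len(arr))
-- by one flat pass computing each position's level as (p+1).bit_length()-1; objective: faster (A builds the bigint 2**i per index).

-- ===== PORT A =====
-- inner loop 'for _ in range(2**i): if len(levels) >= len(arr): break; levels.append(i)'
def clpInner (fuel : Nat) (i : Int) (n : Nat) (levels : List Int) : List Int :=
  match fuel with
  | 0 => levels
  | f + 1 =>
      if levels.length ≥ n then levels
      else clpInner f i n (levels ++ [i])

def create_levels_py (arr : List Int) : List Int :=
  (PySem.List.enumerate arr).foldl
    (fun levels p => clpInner (2 ^ p.1.toNat) p.1 arr.length levels) []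

-- ===== PORT B =====
def create_levels_py_alt (arr : List Int) : List Int :=
  (PySem.List.pyRange 0 (arr.length : Int) 1).map
    (fun p => ((PySem.Int.bitLength (p + 1) : Int) - 1))

-- ===== PRECONDITION & SPEC =====
def Spec_create_levels_py (arr : List Int) (out : List Int) : Prop := out = create_levels_py_alt arr
instance (arr : List Int) (out : List Int) : Decidable (Spec_create_levels_py arr out) := by unfold Spec_create_levels_py; infer_instance

-- ===== CLAIM (what is proved, stated in full; the proofs are below) =====
def Claim_equal_create_levels_py : Prop := ∀ (arr : List Int), Dom_create_levels_py arr → Spec_create_levels_py arr (create_levels_py arr)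

-- ===== LEMMAS AND PROOFS =====

-- the level of position p (what B computes per element)
def clpLvl (p : Nat) : Int := (PySem.Int.bitLength ((p : Int) + 1) : Int) - 1

theorem clpInner_eq (f : Nat) (i : Int) (n : Nat) :
    ∀ levels : List Int,
      clpInner f i n levels = levels ++ List.replicate (min f (n - levels.length)) i := by
  induction f with
  | zero => intro levels; simp [clpInner]
  | succ f ih =>
      intro levels
      by_cases h : levels.length ≥ n
      · simp [clpInner, h]
      · have hlt : levels.length < n := by omega
        have hm : min (f + 1) (n - levels.length) = min f (n - (levels ++ [i]).length) + 1 := by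
          simp only [List.length_append, List.length_cons, List.length_nil]
          omega
        simp only [clpInner, if_neg (by omega : ¬ levels.length ≥ n), ih (levels ++ [i]), hm,
          List.replicate_succ]
        simp

theorem clpBitLength (k : Nat) : ∀ m : Nat, 2 ^ k ≤ m → m < 2 ^ (k + 1) →
    PySem.Int.bitLength (m : Int) = k + 1 := by
  induction k with
  | zero =>
      intro m h1 h2
      have : m = 1 := by omega
      subst this; decide
  | succ k ih =>
      intro m h1 h2
      have hpos : 0 < m := by
        have : 1 ≤ 2 ^ (k + 1) := Nat.one_le_two_pow
        omega
      rw [PySem.Int.bitLength_natCast (m := m) hpos]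
      have h1' : 2 ^ k ≤ m / 2 := by
        have := Nat.pow_succ 2 k; omega
      have h2' : m / 2 < 2 ^ (k + 1) := by
        have := Nat.pow_succ 2 (k + 1); omega
      rw [ih (m / 2) h1' h2']

theorem clpLvl_const (k p : Nat) (h1 : 2 ^ k - 1 ≤ p) (h2 : p < 2 ^ (k + 1) - 1) :
    clpLvl p = (k : Int) := by
  unfold clpLvl
  have hc : ((p : Int) + 1) = ((p + 1 : Nat) : Int) := by push_cast; ring
  rw [hc, clpBitLength k (p + 1) (by have := Nat.one_le_two_pow (n := k); omega)
    (by omega)]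
  push_cast; ring

theorem clpOuter (l : List α) (n : Nat) :
    ∀ (k : Nat) (levels : List Int),
      levels = (List.range (min n (2 ^ k - 1))).map clpLvl →
      (PySem.List.enumerate l (k : Int)).foldl
          (fun levels p => clpInner (2 ^ p.1.toNat) p.1 n levels) levels
        = (List.range (min n (2 ^ (k + l.length) - 1))).map clpLvl := by
  induction l with
  | nil => intro k levels h; simpa [PySem.List.enumerate] using h
  | cons x l ih =>
      intro k levels h
      rw [PySem.List.enumerate_cons, List.foldl_cons]
      have hk : ((k : Int)).toNat = k := Int.toNat_natCast k
      have hlen : levels.length = min n (2 ^ k - 1) := by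
        rw [h]; simp
      -- the inner loop appends level k for the positions [min n (2^k-1), min n (2^(k+1)-1))
      have hstep : clpInner (2 ^ (k : Int).toNat) (k : Int) n levels
          = (List.range (min n (2 ^ (k + 1) - 1))).map clpLvl := by
        rw [hk, clpInner_eq, hlen, h]
        set L := min n (2 ^ k - 1) with hL
        set m := min (2 ^ k) (n - L) with hm
        have hpow : 2 ^ (k + 1) = 2 ^ k + 2 ^ k := by rw [Nat.pow_succ]; omega
        have hone : 1 ≤ 2 ^ k := Nat.one_le_two_pow
        have hsum : L + m = min n (2 ^ (k + 1) - 1) := by omega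
        have hrep : List.replicate m ((k : Nat) : Int) = (List.range' L m).map clpLvl := by
          have : ∀ p ∈ List.range' L m, clpLvl p = ((k : Nat) : Int) := by
            intro p hp
            rw [List.mem_range'] at hp
            obtain ⟨j, hj, hpj⟩ := hp
            -- m > 0 forces L = 2^k - 1
            have hm0 : 0 < m := by omega
            have hLeq : L = 2 ^ k - 1 := by omega
            exact clpLvl_const k p (by omega) (by omega)
          calc List.replicate m ((k : Nat) : Int)
              = (List.range' L m).map (fun _ => ((k : Nat) : Int)) := by
                simp [List.map_const']
            _ = (List.range' L m).map clpLvl := (List.map_congr_left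
                (fun p hp => (this p hp).symm))
        have hr : List.range (L + m) = List.range L ++ List.range' L m := by
          rw [List.range_add, List.range'_eq_map_range]
        rw [hrep, ← List.map_append, ← hsum, hr]
      rw [hstep]
      have hih := ih (k + 1) ((List.range (min n (2 ^ (k + 1) - 1))).map clpLvl) rfl
      have hcast : ((k : Int) + 1) = ((k + 1 : Nat) : Int) := by push_cast; ring
      have he : k + 1 + l.length = k + (x :: l).length := by
        simp [List.length_cons]; omega
      rw [he] at hih
      rw [hcast, hih]

theorem clp_n_le : ∀ n : Nat, n ≤ 2 ^ n - 1 := by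
  intro n
  have := Nat.lt_two_pow_self (n := n)
  omega

-- ===== VERDICT (by name: the statement is the Claim_ definition above) =====
theorem create_levels_py_spec : Claim_equal_create_levels_py := by
  intro arr _
  unfold Spec_create_levels_py create_levels_py create_levels_py_alt
  have h0 : ((0 : Nat) : Int) = (0 : Int) := rfl
  have := clpOuter arr arr.length 0 [] (by simp)
  rw [h0] at this
  rw [this]
  have hz : 0 + arr.length = arr.length := by omega
  rw [hz]
  have hmin : min arr.length (2 ^ arr.length - 1) = arr.length := by
    have := clp_n_le arr.length; omega
  rw [hmin, PySem.List.pyRange_one]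
  simp [clpLvl]
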